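-- pv_equiv track=rewrite | github.com/ginax17/recursion-python | submission_004-problem/super_algos.py | sum_all
-- ===== SOURCE A (Python) =====
-- def sum_all(element):
--     if len(element) == 0:
--         return -1
--
--     elif not str(element[0]).isdigit() and '-' not in str(element[0]):
--         return -1
--     elif len(element) == 1: #this is the escape clause in the sum function
--         return element[0]
--     else:
--         return element[0] + sum_all(element[1:])
-- ===== SOURCE B (Python) =====
-- def sum_all(element):
--     # Iterative: built-in sum over the list; empty list yields -1 as in A.
--     # (A's per-element "digit or '-'" string check can never reject an int.)
--     if not element:
--         return -1
--     return sum(element)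
-- ===== Notes on version B (the rewrite author's own statement) =====
-- stated objective: faster
-- what changed: Replaced the O(n^2) recursion with per-step list slicing and str()-based validity checks (which can never reject an int) by a single built-in sum() pass with an empty-list guard.
import Mathlib
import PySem

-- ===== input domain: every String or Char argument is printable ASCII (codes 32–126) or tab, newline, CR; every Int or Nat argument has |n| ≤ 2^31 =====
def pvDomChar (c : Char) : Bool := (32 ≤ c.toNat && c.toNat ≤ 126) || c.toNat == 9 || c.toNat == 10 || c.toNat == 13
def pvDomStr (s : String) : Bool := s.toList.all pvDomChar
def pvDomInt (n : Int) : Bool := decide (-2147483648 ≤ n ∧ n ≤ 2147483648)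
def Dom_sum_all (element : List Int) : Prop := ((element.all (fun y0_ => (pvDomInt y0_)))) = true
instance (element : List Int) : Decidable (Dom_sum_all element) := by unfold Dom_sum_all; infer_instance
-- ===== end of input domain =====

-- B replaces A's per-step list-slicing recursion (with a str()-based validity check
-- that never rejects an int) by a single guarded built-in sum pass.

-- ===== PORT A =====
def sum_all (element : List Int) : Int :=
  match element with
  | [] => -1                                           -- len(element) == 0
  | x :: rest =>
    if !(PySem.Str.strIsdigit (PySem.Int.toStr x)) && !(PySem.Str.isIn "-" (PySem.Int.toStr x)) then
      -1                                               -- not str(e[0]).isdigit() and '-' not in str(e[0])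
    else if rest = [] then x                           -- len(element) == 1
    else x + sum_all rest                              -- element[1:] on x::rest is rest

-- ===== PORT B =====
def sum_all_alt (element : List Int) : Int :=
  if element.isEmpty then -1 else element.sum          -- sum(element)

-- ===== PRECONDITION & SPEC =====
def Spec_sum_all (element : List Int) (out : Int) : Prop := out = sum_all_alt element
instance (element : List Int) (out : Int) : Decidable (Spec_sum_all element out) := by unfold Spec_sum_all; infer_instance

-- ===== CLAIM (what is proved, stated in full; the proofs are below) =====
def Claim_equal_sum_all : Prop := ∀ (element : List Int), Dom_sum_all element → Spec_sum_all element (sum_all element)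

-- ===== LEMMAS AND PROOFS =====

theorem pv_isdigit_eq (c : Char) : PySem.Chars.isdigit c = c.isDigit := by
  simp only [PySem.Chars.isdigit, Char.isDigit, Char.le_def]

theorem pv_toDigits_ne_nil (n : Nat) : Nat.toDigits 10 n ≠ [] := by
  rw [Nat.toDigits_eq_if (by norm_num)]
  split_ifs <;> simp

-- A's validity test never fires on an int: nonnegative ints render as digits,
-- negatives contain '-'.
theorem pv_guard_false (x : Int) :
    (!(PySem.Str.strIsdigit (PySem.Int.toStr x)) && !(PySem.Str.isIn "-" (PySem.Int.toStr x))) = false := by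
  by_cases h : x < 0
  · have hin : PySem.Str.isIn "-" (PySem.Int.toStr x) = true := by
      rw [PySem.Str.isIn_iff_infix, PySem.Int.toList_toStr]
      simp only [PySem.Int.toChars, if_pos h]
      exact List.IsPrefix.isInfix ⟨Nat.toDigits 10 x.natAbs, rfl⟩
    rw [hin]; simp
  · have hdig : PySem.Str.strIsdigit (PySem.Int.toStr x) = true := by
      rw [PySem.Str.strIsdigit_eq, PySem.Int.toList_toStr]
      simp only [PySem.Int.toChars, if_neg h]
      unfold PySem.Chars.strIsdigit
      rw [Bool.and_eq_true, List.all_eq_true]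
      constructor
      · simpa [List.isEmpty_iff] using pv_toDigits_ne_nil x.toNat
      · intro c hc
        rw [pv_isdigit_eq]
        exact Nat.isDigit_of_mem_toDigits (by norm_num) (by norm_num) hc
    rw [hdig]; simp

theorem pv_sum_all_eq (element : List Int) : sum_all element = sum_all_alt element := by
  induction element with
  | nil => rfl
  | cons x rest ih =>
    rw [sum_all, pv_guard_false]
    simp only [Bool.false_eq_true, if_false]
    by_cases hr : rest = []
    · subst hr; simp [sum_all_alt]
    · rw [if_neg hr, ih]
      simp [sum_all_alt, List.isEmpty_iff, hr]

-- ===== VERDICT (by name: the statement is the Claim_ definition above) =====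
theorem sum_all_spec : Claim_equal_sum_all := by
  intro element _
  exact pv_sum_all_eq element
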